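-- pv_equiv track=rewrite | github.com/freepass-creator/freepasserp | app.py | _dedupe_users
-- ===== SOURCE A (Python) =====
-- from typing import Any, Dict, List
--
-- def _dedupe_users(rows: List[Dict[str, Any]]) -> List[Dict[str, Any]]:
--     """Remove duplicates by email/code while keeping the newest row.
--
--     승인/재처리 과정에서 같은 이메일이 중복 저장되면 로그인 시 오래된 레코드가 먼저 잡혀
--     "비밀번호 오류"처럼 보일 수 있다. (local MVP 안전장치)
--     """
--
--     def _key(u: Dict[str, Any]) -> str:
--         return (u.get("email") or "").strip().lower() or str(u.get("code") or "")
--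
--     def _ts(u: Dict[str, Any]) -> str:
--         return str(u.get("updated_at") or u.get("approved_at") or u.get("rejected_at") or u.get("created_at") or "")
--
--     best: Dict[str, Dict[str, Any]] = {}
--     for u in rows:
--         if not isinstance(u, dict):
--             continue
--         k = _key(u)
--         if not k:
--             continue
--         if k not in best or _ts(u) > _ts(best[k]):
--             best[k] = u
--
--     out = list(best.values())
--     out.sort(key=lambda r: str(r.get("updated_at") or r.get("approved_at") or r.get("rejected_at") or r.get("created_at") or ""), reverse=True)
--     return out
-- ===== SOURCE B (Python) =====
-- from typing import Any, Dict, List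
--
-- def _dedupe_users(rows: List[Dict[str, Any]]) -> List[Dict[str, Any]]:
--     """Group-by re-implementation: collect first-occurrence key order, take the
--     first-maximal row of each key group with max(), then sort newest-first."""
--
--     def _key(u: Dict[str, Any]) -> str:
--         return (u.get("email") or "").strip().lower() or str(u.get("code") or "")
--
--     def _ts(u: Dict[str, Any]) -> str:
--         return str(u.get("updated_at") or u.get("approved_at") or u.get("rejected_at") or u.get("created_at") or "")
--
--     valid = [u for u in rows if isinstance(u, dict) and _key(u)]
--     keys: List[str] = []
--     for u in valid:
--         k = _key(u)
--         if k not in keys: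
--             keys.append(k)
--     reps = [max((v for v in valid if _key(v) == k), key=_ts) for k in keys]
--     return sorted(reps, key=_ts, reverse=True)
-- ===== Notes on version B (the rewrite author's own statement) =====
-- stated objective: alternative
-- what changed: A's single pass that maintains a best-so-far dict (conditional overwrite per key) is replaced by a declarative group-by: collect keys in first-occurrence order, take max(group, key=_ts) for each key's group, then sort newest-first.
import Mathlib
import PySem

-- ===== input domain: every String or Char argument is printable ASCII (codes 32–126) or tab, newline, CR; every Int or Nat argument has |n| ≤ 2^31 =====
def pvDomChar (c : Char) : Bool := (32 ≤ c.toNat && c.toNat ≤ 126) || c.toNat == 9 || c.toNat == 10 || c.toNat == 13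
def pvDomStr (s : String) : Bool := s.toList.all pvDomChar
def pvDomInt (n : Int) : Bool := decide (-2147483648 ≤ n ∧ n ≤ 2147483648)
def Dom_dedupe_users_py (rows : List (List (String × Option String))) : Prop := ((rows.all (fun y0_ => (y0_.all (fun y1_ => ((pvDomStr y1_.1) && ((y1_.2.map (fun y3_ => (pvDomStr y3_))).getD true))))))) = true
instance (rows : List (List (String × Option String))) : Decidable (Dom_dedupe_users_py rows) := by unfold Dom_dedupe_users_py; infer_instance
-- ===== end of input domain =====

-- B replaces A's incremental best-so-far dict with a declarative group-by
-- (first-occurrence key list + max() per key group); same result, no speed claim.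

-- Shared helpers: both Python versions define the SAME `_key` and `_ts` verbatim.
-- u.get(f): first-match lookup in the association list; `x or ""` maps None/missing/"" to "".
def pvGetStr (u : List (String × Option String)) (f : String) : String :=
  match (PySem.Dict.mk u).get? f with
  | some (some s) => s
  | _ => ""

-- Python `a or b` for strings ("" is the only falsy string)
def pvOrStr (a b : String) : String := if a = "" then b else a

def pvKey (u : List (String × Option String)) : String :=
  pvOrStr (PySem.Str.lower (PySem.Str.strip (pvGetStr u "email"))) (pvGetStr u "code")

def pvTs (u : List (String × Option String)) : String :=
  pvOrStr (pvGetStr u "updated_at") (pvOrStr (pvGetStr u "approved_at")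
    (pvOrStr (pvGetStr u "rejected_at") (pvGetStr u "created_at")))

-- ===== PORT A =====
-- loop body of A's `for u in rows:` (the `isinstance(u, dict)` guard is always true
-- under the type convention, so only the empty-key `continue` remains)
def pvStep (d : PySem.Dict String (List (String × Option String)))
    (u : List (String × Option String)) : PySem.Dict String (List (String × Option String)) :=
  if pvKey u = "" then d
  else if (match d.get? (pvKey u) with | none => true | some b => decide (pvTs b < pvTs u)) then
    d.insert (pvKey u) u
  else d

def dedupe_users_py (rows : List (List (String × Option String))) :
    List (List (String × Option String)) :=
  let best := rows.foldl pvStep PySem.Dict.empty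
  -- out = list(best.values()); out.sort(key=<the _ts lambda>, reverse=True)
  PySem.List.sorted best.values pvTs (reverse := true)

-- ===== PORT B =====
-- loop body of B's first-occurrence key collection
def pvKeyStep (ks : List String) (u : List (String × Option String)) : List String :=
  if pvKey u ∈ ks then ks else ks ++ [pvKey u]

def dedupe_users_py_alt (rows : List (List (String × Option String))) :
    List (List (String × Option String)) :=
  let valid := rows.filter (fun u => pvKey u != "")
  let keys := valid.foldl pvKeyStep []
  -- reps = [max((v for v in valid if _key(v) == k), key=_ts) for k in keys]
  -- (each key group is nonempty, so Python's max always returns; filterMap transcribes that)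
  let reps := keys.filterMap (fun k => PySem.List.max? (valid.filter (fun v => pvKey v == k)) pvTs)
  PySem.List.sorted reps pvTs (reverse := true)

-- ===== PRECONDITION & SPEC =====
def Spec_dedupe_users_py (rows : List (List (String × Option String))) (out : List (List (String × Option String))) : Prop := out = dedupe_users_py_alt rows
instance (rows : List (List (String × Option String))) (out : List (List (String × Option String))) : Decidable (Spec_dedupe_users_py rows out) := by unfold Spec_dedupe_users_py; infer_instance

-- ===== CLAIM (what is proved, stated in full; the proofs are below) =====
def Claim_equal_dedupe_users_py : Prop := ∀ (rows : List (List (String × Option String))), Dom_dedupe_users_py rows → Spec_dedupe_users_py rows (dedupe_users_py rows)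

-- ===== LEMMAS AND PROOFS =====

-- B's valid rows / first-occurrence key list / per-key group maximum, as named functions
def pvValid (rows : List (List (String × Option String))) : List (List (String × Option String)) :=
  rows.filter (fun u => pvKey u != "")

def pvKeys (rows : List (List (String × Option String))) : List String :=
  (pvValid rows).foldl pvKeyStep []

def pvF (l : List (List (String × Option String))) (k : String) :
    Option (List (String × Option String)) :=
  PySem.List.max? (l.filter (fun v => pvKey v == k)) pvTs

def pvEntry (f : String → Option (List (String × Option String))) (k : String) :
    Option (String × List (String × Option String)) :=
  (f k).map (fun m => (k, m))

theorem pvMax?_append_of_none {α : Type}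
    {g : List α} (u : α) {key : α → String}
    (h : PySem.List.max? g key = none) :
    PySem.List.max? (g ++ [u]) key = some u := by
  simp only [PySem.List.max?] at h ⊢
  rw [List.foldl_append, List.foldl_cons, List.foldl_nil, h]

theorem pvMax?_append_of_some {α : Type}
    {g : List α} (u : α) {key : α → String} {m : α}
    (h : PySem.List.max? g key = some m) :
    PySem.List.max? (g ++ [u]) key = if key m < key u then some u else some m := by
  simp only [PySem.List.max?] at h ⊢
  rw [List.foldl_append, List.foldl_cons, List.foldl_nil, h]

theorem pvMem_foldl_keyStep (l : List (List (String × Option String)))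
    (acc : List String) (k : String) :
    k ∈ l.foldl pvKeyStep acc ↔ k ∈ acc ∨ k ∈ l.map pvKey := by
  induction l generalizing acc with
  | nil => simp
  | cons a t ih =>
    rw [List.foldl_cons, ih]
    simp only [pvKeyStep, List.map_cons, List.mem_cons]
    split
    · next h0 =>
      constructor
      · rintro (h | h)
        · exact Or.inl h
        · exact Or.inr (Or.inr h)
      · rintro (h | h | h)
        · exact Or.inl h
        · exact Or.inl (h ▸ h0)
        · exact Or.inr h
    · simp only [List.mem_append, List.mem_singleton]
      exact or_assoc

theorem pvNodup_foldl_keyStep (l : List (List (String × Option String)))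
    (acc : List String) (h : acc.Nodup) : (l.foldl pvKeyStep acc).Nodup := by
  induction l generalizing acc with
  | nil => exact h
  | cons a t ih =>
    refine ih _ ?_
    simp only [pvKeyStep]
    split
    · exact h
    · next h0 =>
      exact List.Nodup.append h (List.nodup_singleton _)
        (fun x hx hx1 => h0 ((List.mem_singleton.mp hx1) ▸ hx))

theorem pvFind_filterMap_entry (keys : List String)
    (f : String → Option (List (String × Option String))) (k : String)
    (h : keys.Nodup) :
    List.find? (fun p => p.1 == k) (keys.filterMap (pvEntry f)) =
      if k ∈ keys then pvEntry f k else none := by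
  induction keys with
  | nil => simp
  | cons a t ih =>
    have ha : a ∉ t := (List.nodup_cons.mp h).1
    have ht : t.Nodup := (List.nodup_cons.mp h).2
    rw [List.filterMap_cons]
    cases hfa : f a with
    | none =>
      have hea : pvEntry f a = none := by simp [pvEntry, hfa]
      rw [hea, ih ht]
      by_cases hak : k = a
      · subst hak; simp [ha, hea]
      · simp [List.mem_cons, hak]
    | some m =>
      have hea : pvEntry f a = some (a, m) := by simp [pvEntry, hfa]
      rw [hea]
      by_cases hak : k = a
      · subst hak; simp [pvEntry, hfa]
      · rw [List.find?_cons_of_neg (by simp [Ne.symm hak]), ih ht]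
        simp [List.mem_cons, hak]

theorem pvGet?_filterMap_entry (keys : List String)
    (f : String → Option (List (String × Option String))) (k : String)
    (h : keys.Nodup) :
    (PySem.Dict.mk (keys.filterMap (pvEntry f))).get? k =
      if k ∈ keys then f k else none := by
  show Option.map _ (List.find? _ _) = _
  rw [pvFind_filterMap_entry keys f k h]
  by_cases hk : k ∈ keys
  · simp only [hk, if_pos]
    cases hfk : f k <;> simp [pvEntry, hfk]
  · simp [hk]

theorem pvMap_snd_filterMap_entry (keys : List String)
    (f : String → Option (List (String × Option String))) :
    (keys.filterMap (pvEntry f)).map Prod.snd = keys.filterMap f := by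
  rw [List.map_filterMap]
  apply List.filterMap_congr
  intro k _
  cases hfk : f k <;> simp [pvEntry, hfk]

set_option maxHeartbeats 1600000 in
theorem pvMain (rows : List (List (String × Option String))) :
    (rows.foldl pvStep PySem.Dict.empty).items =
      (pvKeys rows).filterMap (pvEntry (pvF (pvValid rows))) := by
  induction rows using List.reverseRecOn with
  | nil => rfl
  | append_singleton l u ih =>
    by_cases hk : pvKey u = ""
    · have hval : pvValid (l ++ [u]) = pvValid l := by
        simp [pvValid, List.filter_append, hk]
      have hkeys : pvKeys (l ++ [u]) = pvKeys l := by simp [pvKeys, hval]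
      rw [List.foldl_append, List.foldl_cons, List.foldl_nil,
        show pvStep (l.foldl pvStep PySem.Dict.empty) u = l.foldl pvStep PySem.Dict.empty from by
          simp [pvStep, hk],
        ih, hkeys, hval]
    · have hval : pvValid (l ++ [u]) = pvValid l ++ [u] := by
        simp [pvValid, List.filter_append, hk]
      have hkeys : pvKeys (l ++ [u]) = pvKeyStep (pvKeys l) u := by
        simp [pvKeys, hval, List.foldl_append]
      have hnd : (pvKeys l).Nodup := pvNodup_foldl_keyStep _ _ List.nodup_nil
      have hmem : ∀ k', k' ∈ pvKeys l ↔ k' ∈ (pvValid l).map pvKey := by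
        intro k'; simpa using pvMem_foldl_keyStep (pvValid l) [] k'
      have hgroup : ∀ k', (pvValid (l ++ [u])).filter (fun v => pvKey v == k') =
          (pvValid l).filter (fun v => pvKey v == k') ++ (if pvKey u = k' then [u] else []) := by
        intro k'
        rw [hval, List.filter_append]
        by_cases h' : pvKey u = k' <;> simp [h']
      have hF : ∀ k', k' ≠ pvKey u → pvF (pvValid (l ++ [u])) k' = pvF (pvValid l) k' := by
        intro k' h'
        unfold pvF
        rw [hgroup k', if_neg (Ne.symm h'), List.append_nil]
      rw [List.foldl_append, List.foldl_cons, List.foldl_nil, hkeys]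
      set D := List.foldl pvStep PySem.Dict.empty l with hDdef
      have hitems : D.items = (pvKeys l).filterMap (pvEntry (pvF (pvValid l))) := ih
      have hDmk : D = PySem.Dict.mk ((pvKeys l).filterMap (pvEntry (pvF (pvValid l)))) :=
        PySem.Dict.ext hitems
      have hget : D.get? (pvKey u) =
          if pvKey u ∈ pvKeys l then pvF (pvValid l) (pvKey u) else none := by
        rw [hDmk]; exact pvGet?_filterMap_entry _ _ _ hnd
      by_cases hin : pvKey u ∈ pvKeys l
      · -- key already present: the dict holds the first maximum m of its group
        obtain ⟨v, hv, hvk⟩ : ∃ v ∈ pvValid l, pvKey v = pvKey u := by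
          simpa using (hmem (pvKey u)).mp hin
        obtain ⟨m, hm⟩ : ∃ m, pvF (pvValid l) (pvKey u) = some m := by
          cases hfk : pvF (pvValid l) (pvKey u) with
          | none =>
            exfalso
            have hnil := (PySem.List.max?_eq_none_iff _ _).mp hfk
            rw [List.filter_eq_nil_iff] at hnil
            exact hnil v hv (by simp [hvk])
          | some m => exact ⟨m, rfl⟩
        have hFk : pvF (pvValid (l ++ [u])) (pvKey u) =
            if pvTs m < pvTs u then some u else some m := by
          unfold pvF
          rw [hgroup (pvKey u), if_pos rfl]
          exact pvMax?_append_of_some u hm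
        have hkeys2 : pvKeyStep (pvKeys l) u = pvKeys l := by simp [pvKeyStep, hin]
        rw [hkeys2]
        have hmemitems : (pvKey u, m) ∈ D.items := by
          rw [hitems]
          exact List.mem_filterMap.mpr ⟨pvKey u, hin, by simp [pvEntry, hm]⟩
        have hcont : D.contains (pvKey u) = true := by
          simp only [PySem.Dict.contains]
          exact List.any_eq_true.mpr ⟨(pvKey u, m), hmemitems, by simp⟩
        have hins : (D.insert (pvKey u) u).items =
            D.items.map (fun p => if p.1 == pvKey u then (pvKey u, u) else p) := by
          simp [PySem.Dict.insert, hcont]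
        unfold pvStep
        rw [if_neg hk, hget, if_pos hin, hm]
        by_cases hcmp : pvTs m < pvTs u
        · rw [if_pos (by simp [hcmp]), hins, hitems, List.map_filterMap]
          apply List.filterMap_congr
          intro k' hk'
          by_cases h' : k' = pvKey u
          · rw [h']
            simp [pvEntry, hm, hFk, hcmp]
          · simp only [pvEntry]
            rw [hF k' h']
            cases hf' : pvF (pvValid l) k' <;> simp [h']
        · rw [if_neg (by simp [hcmp]), hitems]
          apply List.filterMap_congr
          intro k' hk'
          by_cases h' : k' = pvKey u
          · rw [h']
            simp [pvEntry, hm, hFk, hcmp]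
          · simp only [pvEntry]
            rw [hF k' h']
      · -- new key: the entry (pvKey u, u) is appended
        have hkeys2 : pvKeyStep (pvKeys l) u = pvKeys l ++ [pvKey u] := by
          simp [pvKeyStep, hin]
        have hgnil : (pvValid l).filter (fun v => pvKey v == pvKey u) = [] := by
          rw [List.filter_eq_nil_iff]
          intro v hv hp
          exact hin ((hmem (pvKey u)).mpr (List.mem_map.mpr ⟨v, hv, by simpa using hp⟩))
        have hFnone : pvF (pvValid l) (pvKey u) = none := by
          unfold pvF; rw [hgnil]; rfl
        have hFku : pvF (pvValid (l ++ [u])) (pvKey u) = some u := by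
          unfold pvF
          rw [hgroup (pvKey u), if_pos rfl]
          exact pvMax?_append_of_none u hFnone
        have hcont : D.contains (pvKey u) = false := by
          simp only [PySem.Dict.contains]
          rw [List.any_eq_false]
          rintro ⟨k', w⟩ hp
          rw [hitems] at hp
          obtain ⟨k'', hk'', he⟩ := List.mem_filterMap.mp hp
          simp only [pvEntry] at he
          cases hf : pvF (pvValid l) k'' <;> rw [hf] at he
          · simp at he
          · simp only [Option.map_some, Option.some.injEq, Prod.mk.injEq] at he
            obtain ⟨h1, _⟩ := he
            simp only [beq_iff_eq]
            intro heq
            have heq' : k' = pvKey u := heq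
            exact hin (heq' ▸ h1 ▸ hk'')
        have hins : (D.insert (pvKey u) u).items = D.items ++ [(pvKey u, u)] := by
          simp [PySem.Dict.insert, hcont]
        unfold pvStep
        rw [if_neg hk, hget, if_neg hin]
        rw [if_pos rfl, hins, hitems, hkeys2, List.filterMap_append]
        congr 1
        · apply List.filterMap_congr
          intro k' hk'
          have h' : k' ≠ pvKey u := fun e => hin (e ▸ hk')
          simp only [pvEntry]
          rw [hF k' h']
        · simp [pvEntry, hFku]

theorem dedupe_users_py_values (rows : List (List (String × Option String))) :
    (rows.foldl pvStep PySem.Dict.empty).values =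
      (pvKeys rows).filterMap (pvF (pvValid rows)) := by
  show ((rows.foldl pvStep PySem.Dict.empty).items).map Prod.snd = _
  rw [pvMain, pvMap_snd_filterMap_entry]

-- ===== VERDICT (by name: the statement is the Claim_ definition above) =====
theorem dedupe_users_py_spec : Claim_equal_dedupe_users_py := by
  intro rows _
  show PySem.List.sorted ((rows.foldl pvStep PySem.Dict.empty).values) pvTs true =
    PySem.List.sorted
      (((rows.filter (fun u => pvKey u != "")).foldl pvKeyStep []).filterMap
        (fun k => PySem.List.max? (((rows.filter (fun u => pvKey u != "")).filter
          (fun v => pvKey v == k))) pvTs)) pvTs true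
  rw [dedupe_users_py_values]
  rfl
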